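-- pv_equiv track=rewrite | github.com/Winzum/advent-of-code-2023 | src/day_14.py | rotate_quarter_clockwise
-- ===== SOURCE A (Python) =====
-- def rotate_quarter_clockwise(input_dict, max_y):
--     rotated_dict = {}
--     for x, y_set in input_dict.items():
--         for y in y_set:
--             new_x = max_y - y
--             new_y = x
--
--             if new_x not in rotated_dict:
--                 rotated_dict[new_x] = set()
--             rotated_dict[new_x].add(new_y)
--
--     return rotated_dict
-- ===== SOURCE B (Python) =====
-- def rotate_quarter_clockwise(input_dict, max_y):
--     # flatten every point to its rotated (new_x, new_y) pair, then group by key scan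
--     pairs = [(max_y - y, x) for x, ys in input_dict.items() for y in ys]
--     keys = list(dict.fromkeys(nx for nx, _ in pairs))
--     return {k: {ny for nx, ny in pairs if nx == k} for k in keys}
-- ===== Notes on version B (the rewrite author's own statement) =====
-- stated objective: alternative
-- what changed: Replaces incremental dict-of-sets mutation per point by a two-phase group-by: first flatten all points into a list of rotated (new_x,new_y) pairs, then derive the key order by ordered dedup and build each group with a per-key scan of the flat pair list.
import Mathlib
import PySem

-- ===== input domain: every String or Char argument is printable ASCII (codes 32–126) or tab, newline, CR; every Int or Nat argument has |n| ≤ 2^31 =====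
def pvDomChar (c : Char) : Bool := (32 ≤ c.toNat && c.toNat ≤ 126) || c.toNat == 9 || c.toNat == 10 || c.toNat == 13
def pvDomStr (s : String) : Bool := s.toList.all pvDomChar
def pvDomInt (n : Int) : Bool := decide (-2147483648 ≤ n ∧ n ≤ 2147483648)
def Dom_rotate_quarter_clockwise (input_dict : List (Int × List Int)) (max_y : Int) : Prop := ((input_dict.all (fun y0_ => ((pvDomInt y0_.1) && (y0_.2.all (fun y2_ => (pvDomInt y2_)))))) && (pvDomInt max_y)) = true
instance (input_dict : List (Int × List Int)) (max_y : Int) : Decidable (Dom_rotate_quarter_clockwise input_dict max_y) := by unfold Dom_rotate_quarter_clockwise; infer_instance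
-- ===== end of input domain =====

-- B replaces A's incremental dict-of-sets mutation by flatten-then-group-by-key (alternative decomposition, same result).


-- ===== PORT A =====
-- rotated_dict = {}; for x, y_set in input_dict.items(): for y in y_set: … ; return rotated_dict
def rotate_quarter_clockwise (input_dict : List (Int × List Int)) (max_y : Int) : List (Int × List Int) :=
  (input_dict.foldl (fun rd (p : Int × List Int) =>
      p.2.foldl (fun rd y =>
        let new_x := max_y - y
        let new_y := p.1
        let rd := if rd.contains new_x then rd else rd.insert new_x PySem.Set.empty
        rd.modify new_x PySem.Set.empty (fun s => PySem.Set.add s new_y)) rd)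
    PySem.Dict.empty).items

-- ===== PORT B =====
-- pairs = [(max_y - y, x) …]; keys = list(dict.fromkeys(nx for nx, _ in pairs)); {k: {ny for nx, ny in pairs if nx == k} for k in keys}
def rotate_quarter_clockwise_alt (input_dict : List (Int × List Int)) (max_y : Int) : List (Int × List Int) :=
  let pairs := input_dict.flatMap (fun p => p.2.map (fun y => (max_y - y, p.1)))
  let keys := PySem.List.dedup (pairs.map (·.1))
  keys.map (fun k => (k, PySem.Set.ofList ((pairs.filter (fun q => q.1 == k)).map (·.2))))

-- ===== PRECONDITION & SPEC =====
def Spec_rotate_quarter_clockwise (input_dict : List (Int × List Int)) (max_y : Int) (out : List (Int × List Int)) : Prop := out = rotate_quarter_clockwise_alt input_dict max_y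
instance (input_dict : List (Int × List Int)) (max_y : Int) (out : List (Int × List Int)) : Decidable (Spec_rotate_quarter_clockwise input_dict max_y out) := by unfold Spec_rotate_quarter_clockwise; infer_instance

-- ===== CLAIM (what is proved, stated in full; the proofs are below) =====
def Claim_equal_rotate_quarter_clockwise : Prop := ∀ (input_dict : List (Int × List Int)) (max_y : Int), Dom_rotate_quarter_clockwise input_dict max_y → Spec_rotate_quarter_clockwise input_dict max_y (rotate_quarter_clockwise input_dict max_y)

-- ===== LEMMAS AND PROOFS =====

-- A's conditional "insert empty then modify" step equals a single modify with default empty.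
theorem step_eq_modify (rd : PySem.Dict Int (PySem.Set Int)) (k v : Int) :
    (if rd.contains k then rd else rd.insert k PySem.Set.empty).modify k PySem.Set.empty
      (fun s => PySem.Set.add s v)
    = rd.modify k PySem.Set.empty (fun s => PySem.Set.add s v) := by
  by_cases h : rd.contains k = true
  · rw [if_pos h]
  · rw [if_neg h]
    replace h : rd.contains k = false := by simpa using h
    have h0 : rd.get? k = none := (PySem.Dict.get?_eq_none_iff_contains rd k).mpr h
    have hg : (rd.insert k PySem.Set.empty).get? k = some PySem.Set.empty :=
      PySem.Dict.get?_insert_self rd k PySem.Set.empty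
    have hne : ∀ p ∈ rd.items, p.1 ≠ k := by
      intro p hp hpk
      have hk : k ∈ rd.keys := by
        simp only [PySem.Dict.keys]
        exact List.mem_map.mpr ⟨p, hp, hpk⟩
      rw [(PySem.Dict.contains_iff_mem_keys rd k).mpr hk] at h
      exact Bool.true_eq_false.mp h
    simp only [PySem.Dict.modify, PySem.Dict.insert, h, Bool.false_eq_true, ↓reduceIte,
      PySem.Set.empty_eq, PySem.Dict.contains_mk, List.any_append, List.any_cons, BEq.rfl,
      List.any_nil, Bool.or_false, Bool.or_true, beq_iff_eq, PySem.Dict.getD, List.map_append,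
      List.map_cons, List.map_nil, PySem.Dict.mk.injEq, List.append_singleton_inj, Prod.mk.injEq,
      true_and]
    constructor
    · apply (List.map_congr_left ?_).trans (List.map_id _)
      intro p hp
      simp [hne p hp]
    · have hg2 : ({ items := rd.items ++ [(k, [])] } : PySem.Dict Int (PySem.Set Int)).get? k = some [] := by
        simpa [PySem.Dict.insert, h, PySem.Set.empty] using hg
      rw [hg2, h0]
      rfl

-- A's nested loop is the fold of the flattened pair list.
theorem foldA_eq_flat (input_dict : List (Int × List Int)) (max_y : Int)
    (d : PySem.Dict Int (PySem.Set Int)) :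
    input_dict.foldl (fun rd (p : Int × List Int) =>
      p.2.foldl (fun rd y =>
        let new_x := max_y - y
        let new_y := p.1
        let rd := if rd.contains new_x then rd else rd.insert new_x PySem.Set.empty
        rd.modify new_x PySem.Set.empty (fun s => PySem.Set.add s new_y)) rd) d
    = (input_dict.flatMap (fun p => p.2.map (fun y => (max_y - y, p.1)))).foldl
        (fun rd q => rd.modify q.1 PySem.Set.empty (fun s => PySem.Set.add s q.2)) d := by
  induction input_dict generalizing d with
  | nil => rfl
  | cons p rest ih =>
    rw [List.foldl_cons, List.flatMap_cons, List.foldl_append, ih, List.foldl_map]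
    congr 1
    apply PySem.List.foldl_congr_mem
    intro rd y _
    exact step_eq_modify rd (max_y - y) p.1

theorem getD_fold_modify_add (l : List (Int × Int)) (d : PySem.Dict Int (PySem.Set Int)) (c : Int) :
    (l.foldl (fun rd q => rd.modify q.1 PySem.Set.empty (fun s => PySem.Set.add s q.2)) d).getD c PySem.Set.empty
    = PySem.Set.update (d.getD c PySem.Set.empty) ((l.filter (fun q => q.1 == c)).map (fun q => q.2)) := by
  induction l generalizing d with
  | nil => simp [PySem.Set.update]
  | cons q l ih =>
    rw [List.foldl_cons, ih]
    by_cases hqc : q.1 = c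
    · rw [List.filter_cons_of_pos (by simp [hqc]), List.map_cons, PySem.Set.update_cons]
      congr 1
      simp [hqc]
    · rw [List.filter_cons_of_neg (by simp [hqc])]
      congr 1
      exact PySem.Dict.getD_modify_of_ne d PySem.Set.empty (fun s => PySem.Set.add s q.2) (fun h => hqc h.symm)

-- ===== VERDICT (by name: the statement is the Claim_ definition above) =====
theorem rotate_quarter_clockwise_spec : Claim_equal_rotate_quarter_clockwise := by
  intro input_dict max_y _
  unfold Spec_rotate_quarter_clockwise rotate_quarter_clockwise rotate_quarter_clockwise_alt
  rw [foldA_eq_flat]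
  set L := input_dict.flatMap (fun p => p.2.map (fun y => (max_y - y, p.1))) with hL
  set F := L.foldl (fun rd q => rd.modify q.1 PySem.Set.empty (fun s => PySem.Set.add s q.2))
    PySem.Dict.empty with hF
  have hnodup : F.keys.Nodup := by
    rw [hF]
    exact PySem.Dict.nodup_keys_foldl_modify_key L (fun q => q.1) PySem.Set.empty _
      PySem.Dict.empty (by simp)
  have hkeys : F.keys = PySem.List.dedup (L.map (fun q => q.1)) := by
    rw [hF, PySem.Dict.keys_foldl_modify_key, PySem.Dict.keys_empty,
      PySem.Set.update_nil_left, PySem.List.dedup_eq_ofList]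
  rw [PySem.Dict.items_eq_map_keys F hnodup PySem.Set.empty, hkeys]
  apply List.map_congr_left
  intro k _
  rw [hF, getD_fold_modify_add, PySem.Dict.getD_empty, PySem.Set.update_empty]
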